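-- pv_equiv track=rewrite | github.com/jmribeiro/gridworlds | environments/LevelBasedForaging.py | compute_apples_that_can_be_foraged
-- ===== SOURCE A (Python) =====
-- def compute_apples_that_can_be_foraged(agents_attempting_foraging, apples_forageable_by_level):
--     apples_that_can_be_foraged = []
--     for apple_level in apples_forageable_by_level:
--         apples = apples_forageable_by_level[apple_level]
--         for apple_id in apples:
--             for agent_id in agents_attempting_foraging:
--                 apples_being_foraged_by_agent = agents_attempting_foraging[agent_id]
--                 if apple_id in apples_being_foraged_by_agent:
--                     apples_that_can_be_foraged.append(apple_id)
--     return apples_that_can_be_foraged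
-- ===== SOURCE B (Python) =====
-- def compute_apples_that_can_be_foraged(agents_attempting_foraging, apples_forageable_by_level):
--     counts = {}
--     for foraged in agents_attempting_foraging.values():
--         for apple_id in set(foraged):
--             counts[apple_id] = counts.get(apple_id, 0) + 1
--     return [apple_id
--             for apples in apples_forageable_by_level.values()
--             for apple_id in apples
--             for _ in range(counts.get(apple_id, 0))]
-- ===== Notes on version B (the rewrite author's own statement) =====
-- stated objective: faster
-- what changed: Instead of scanning every agent's foraging set for every apple occurrence, B precomputes once a counter apple_id -> number of agents targeting it, then emits each apple_id repeated by its count.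
import Mathlib
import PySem

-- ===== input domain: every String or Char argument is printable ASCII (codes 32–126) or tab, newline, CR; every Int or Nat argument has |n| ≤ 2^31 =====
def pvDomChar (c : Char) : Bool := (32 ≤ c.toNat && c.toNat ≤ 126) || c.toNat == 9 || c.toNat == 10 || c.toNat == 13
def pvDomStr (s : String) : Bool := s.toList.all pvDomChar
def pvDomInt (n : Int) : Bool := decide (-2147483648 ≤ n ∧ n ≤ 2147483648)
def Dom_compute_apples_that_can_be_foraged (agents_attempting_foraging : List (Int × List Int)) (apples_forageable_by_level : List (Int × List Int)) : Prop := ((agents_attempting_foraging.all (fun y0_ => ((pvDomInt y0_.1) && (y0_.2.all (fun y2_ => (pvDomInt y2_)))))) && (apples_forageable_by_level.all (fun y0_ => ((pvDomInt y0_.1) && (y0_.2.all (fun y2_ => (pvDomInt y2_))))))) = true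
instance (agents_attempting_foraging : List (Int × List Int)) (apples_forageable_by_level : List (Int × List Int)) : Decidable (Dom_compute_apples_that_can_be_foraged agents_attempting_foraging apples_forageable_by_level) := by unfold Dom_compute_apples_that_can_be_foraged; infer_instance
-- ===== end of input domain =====

-- B replaces A's per-apple scan over all agents by a precomputed counter apple_id -> number of agents targeting it (faster).


-- ===== PORT A =====
-- A iterates the apples dict's keys, looks each key up, and for every apple occurrence scans
-- every agent's key, looks the agent up, and appends apple_id when that agent targets it.
def compute_apples_that_can_be_foraged (agents_attempting_foraging : List (Int × List Int)) (apples_forageable_by_level : List (Int × List Int)) : List Int :=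
  (PySem.Dict.mk apples_forageable_by_level).keys.foldl (fun acc apple_level =>
    let apples := (PySem.Dict.mk apples_forageable_by_level).getD apple_level []
    apples.foldl (fun acc apple_id =>
      (PySem.Dict.mk agents_attempting_foraging).keys.foldl (fun acc agent_id =>
        let apples_being_foraged_by_agent := (PySem.Dict.mk agents_attempting_foraging).getD agent_id []
        if apple_id ∈ apples_being_foraged_by_agent then acc ++ [apple_id] else acc) acc) acc) []

-- ===== PORT B =====
-- B builds counts : apple_id -> number of agents whose foraging set contains it, then emits
-- each apple occurrence (dict values in order) repeated counts[apple_id] times.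
def compute_apples_that_can_be_foraged_alt (agents_attempting_foraging : List (Int × List Int)) (apples_forageable_by_level : List (Int × List Int)) : List Int :=
  let counts : PySem.Dict Int Int :=
    agents_attempting_foraging.foldl (fun d p =>
      (PySem.Set.ofList p.2).foldl (fun d apple_id => d.modify apple_id 0 (· + 1)) d) PySem.Dict.empty
  apples_forageable_by_level.foldl (fun acc p =>
    acc ++ p.2.flatMap (fun apple_id => List.replicate (counts.getD apple_id 0).toNat apple_id)) []

-- ===== PRECONDITION & SPEC =====
-- Pre_ excludes association lists with duplicate keys: a Python dict can never contain them
-- (the first-match behaviour of the encoding there corresponds to no Python input).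
def Pre_compute_apples_that_can_be_foraged (agents_attempting_foraging : List (Int × List Int)) (apples_forageable_by_level : List (Int × List Int)) : Prop :=
  (agents_attempting_foraging.map Prod.fst).Nodup ∧ (apples_forageable_by_level.map Prod.fst).Nodup
instance (agents_attempting_foraging : List (Int × List Int)) (apples_forageable_by_level : List (Int × List Int)) : Decidable (Pre_compute_apples_that_can_be_foraged agents_attempting_foraging apples_forageable_by_level) := by unfold Pre_compute_apples_that_can_be_foraged; infer_instance
def pvWitness_compute_apples_that_can_be_foraged : (List (Int × List Int)) × (List (Int × List Int)) :=
  ([(0, [1, 2]), (1, [2])], [(3, [1, 2, 2]), (4, [5])])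
def Spec_compute_apples_that_can_be_foraged (agents_attempting_foraging : List (Int × List Int)) (apples_forageable_by_level : List (Int × List Int)) (out : List Int) : Prop := out = compute_apples_that_can_be_foraged_alt agents_attempting_foraging apples_forageable_by_level
instance (agents_attempting_foraging : List (Int × List Int)) (apples_forageable_by_level : List (Int × List Int)) (out : List Int) : Decidable (Spec_compute_apples_that_can_be_foraged agents_attempting_foraging apples_forageable_by_level out) := by unfold Spec_compute_apples_that_can_be_foraged; infer_instance

-- ===== CLAIM (what is proved, stated in full; the proofs are below) =====
def Claim_equal_compute_apples_that_can_be_foraged : Prop := ∀ (agents_attempting_foraging : List (Int × List Int)) (apples_forageable_by_level : List (Int × List Int)), Dom_compute_apples_that_can_be_foraged agents_attempting_foraging apples_forageable_by_level → Pre_compute_apples_that_can_be_foraged agents_attempting_foraging apples_forageable_by_level → Spec_compute_apples_that_can_be_foraged agents_attempting_foraging apples_forageable_by_level (compute_apples_that_can_be_foraged agents_attempting_foraging apples_forageable_by_level)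

-- ===== LEMMAS AND PROOFS =====

-- how often an apple occurrence is emitted: once per agent whose foraging list contains it
def pvCnt (ag : List (Int × List Int)) (aid : Int) : Nat := ag.countP (fun p => decide (aid ∈ p.2))

-- with Nodup keys, a fold over a dict's keys that looks each key up is a fold over the pairs' values
theorem keys_fold_eq_pairs_fold {α : Type} (l : List (Int × List Int))
    (hnd : (l.map Prod.fst).Nodup) (f : α → List Int → α) (acc : α) :
    (PySem.Dict.mk l).keys.foldl (fun acc k => f acc ((PySem.Dict.mk l).getD k [])) acc
      = l.foldl (fun acc p => f acc p.2) acc := by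
  induction l generalizing acc with
  | nil => simp [PySem.Dict.keys]
  | cons p t ih =>
      obtain ⟨k, v⟩ := p
      simp only [List.map_cons, List.nodup_cons] at hnd
      have hkeys : (PySem.Dict.mk ((k, v) :: t)).keys = k :: (PySem.Dict.mk t).keys := by
        simp [PySem.Dict.keys]
      have hself : (PySem.Dict.mk ((k, v) :: t)).getD k [] = v := by
        simp [PySem.Dict.getD_eq_get?_getD, PySem.Dict.get?_mk_cons]
      rw [hkeys, List.foldl_cons, hself, List.foldl_cons]
      have hcg := PySem.List.foldl_congr_mem ((PySem.Dict.mk t).keys)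
        (fun acc k1 => f acc ((PySem.Dict.mk ((k, v) :: t)).getD k1 []))
        (fun acc k1 => f acc ((PySem.Dict.mk t).getD k1 [])) (f acc v)
        (by
          intro b x hx
          have hxk : k ≠ x := by
            rintro rfl
            exact hnd.1 (by simpa [PySem.Dict.keys] using hx)
          simp only [PySem.Dict.getD_eq_get?_getD, PySem.Dict.get?_mk_cons]
          simp [hxk])
      rw [hcg]
      exact ih hnd.2 _

-- A's innermost scan over the agent pairs emits the apple once per agent containing it
theorem inner_scan (ag : List (Int × List Int)) (aid : Int) (acc : List Int) :
    ag.foldl (fun acc p => if aid ∈ p.2 then acc ++ [aid] else acc) acc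
      = acc ++ List.replicate (pvCnt ag aid) aid := by
  induction ag generalizing acc with
  | nil => simp [pvCnt]
  | cons p t ih =>
      rw [List.foldl_cons]
      by_cases h : aid ∈ p.2 <;>
        simp [h, ih, pvCnt, List.replicate_succ, List.append_assoc]

-- one level of A: each apple occurrence contributes its replicate block in order
theorem level_scan (ag : List (Int × List Int)) (hag : (ag.map Prod.fst).Nodup)
    (apples acc : List Int) :
    apples.foldl (fun acc aid =>
        (PySem.Dict.mk ag).keys.foldl (fun acc agid =>
          if aid ∈ (PySem.Dict.mk ag).getD agid [] then acc ++ [aid] else acc) acc) acc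
      = acc ++ apples.flatMap (fun aid => List.replicate (pvCnt ag aid) aid) := by
  induction apples generalizing acc with
  | nil => simp
  | cons a t ih =>
      rw [List.foldl_cons,
        keys_fold_eq_pairs_fold ag hag (fun acc s => if a ∈ s then acc ++ [a] else acc),
        inner_scan, ih, List.flatMap_cons, List.append_assoc]

-- the counter B builds holds exactly pvCnt on top of its start value
theorem counts_getD (ag : List (Int × List Int)) (d : PySem.Dict Int Int) (v : Int) :
    (ag.foldl (fun d p => (PySem.Set.ofList p.2).foldl (fun d apple_id => d.modify apple_id 0 (· + 1)) d) d).getD v 0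
      = d.getD v 0 + (pvCnt ag v : Int) := by
  induction ag generalizing d with
  | nil => simp [pvCnt]
  | cons p t ih =>
      rw [List.foldl_cons, ih, PySem.Dict.getD_foldl_modify_add_one]
      have hc : (PySem.Set.ofList p.2).count v = if v ∈ p.2 then 1 else 0 := by
        by_cases h : v ∈ p.2
        · exact if_pos h ▸ List.count_eq_one_of_mem (PySem.Set.nodup_ofList p.2)
            ((PySem.Set.mem_ofList p.2 v).2 h)
        · exact if_neg h ▸ List.count_eq_zero_of_not_mem (fun hm => h ((PySem.Set.mem_ofList p.2 v).1 hm))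
      rw [hc]
      by_cases h : v ∈ p.2 <;> simp [pvCnt, h]
      omega

-- ===== VERDICT (by name: the statement is the Claim_ definition above) =====
theorem compute_apples_that_can_be_foraged_spec : Claim_equal_compute_apples_that_can_be_foraged := by
  intro ag aps _ hpre
  unfold Spec_compute_apples_that_can_be_foraged
  unfold compute_apples_that_can_be_foraged compute_apples_that_can_be_foraged_alt
  show (PySem.Dict.mk aps).keys.foldl (fun acc apple_level =>
      ((PySem.Dict.mk aps).getD apple_level []).foldl (fun acc apple_id =>
        (PySem.Dict.mk ag).keys.foldl (fun acc agent_id =>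
          if apple_id ∈ (PySem.Dict.mk ag).getD agent_id [] then acc ++ [apple_id] else acc) acc) acc) []
    = aps.foldl (fun (acc : List Int) (p : Int × List Int) =>
        acc ++ p.2.flatMap (fun apple_id =>
          List.replicate (((ag.foldl (fun (d : PySem.Dict Int Int) (p : Int × List Int) => (PySem.Set.ofList p.2).foldl (fun d apple_id => d.modify apple_id 0 (· + 1)) d) PySem.Dict.empty).getD apple_id 0).toNat) apple_id)) []
  rw [keys_fold_eq_pairs_fold aps hpre.2 (fun acc apples =>
    apples.foldl (fun acc apple_id =>
      (PySem.Dict.mk ag).keys.foldl (fun acc agent_id =>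
        if apple_id ∈ (PySem.Dict.mk ag).getD agent_id [] then acc ++ [apple_id] else acc) acc) acc)]
  rw [PySem.List.foldl_congr_mem aps _
      (fun acc (p : Int × List Int) =>
        acc ++ p.2.flatMap (fun aid => List.replicate (pvCnt ag aid) aid)) []
      (by intro acc p _; exact level_scan ag hpre.1 p.2 acc)]
  have hfun : (fun aid => List.replicate (pvCnt ag aid) aid)
      = fun aid => List.replicate ((ag.foldl (fun (d : PySem.Dict Int Int) (p : Int × List Int) => (PySem.Set.ofList p.2).foldl (fun d apple_id => d.modify apple_id 0 (· + 1)) d) PySem.Dict.empty).getD aid 0).toNat aid := by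
    funext aid
    rw [counts_getD]
    simp
  rw [hfun]
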